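-- pv_equiv track=rewrite | github.com/jmpop97/py | test10.py | d_plus
-- ===== SOURCE A (Python) =====
-- def d_plus(a_list, n_list):
--     del_list = []
--     for i in range(len(a_list)):
--         if a_list[i] == "+":
--             n_list[i+1] = n_list[i]+n_list[i+1]
--             del_list.append(i)
--     for del_el in reversed(del_list):
--         del a_list[del_el]
--         del n_list[del_el]
--     return a_list, n_list
-- ===== SOURCE B (Python) =====
-- def d_plus(a_list, n_list):
--     # Single pass with a running carry; builds fresh lists (A mutates its arguments in place).
--     result_a = [a for a in a_list if a != "+"]
--     result_n = []
--     carry = 0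
--     markers = iter(a_list)
--     for v in n_list:
--         a = next(markers, None)
--         v += carry
--         if a == "+":
--             carry = v
--         else:
--             result_n.append(v)
--             carry = 0
--     return result_a, result_n
-- ===== Notes on version B (the rewrite author's own statement) =====
-- stated objective: alternative
-- what changed: Replaces the index-marking pass plus repeated in-place del by one left-to-right pass with a running carry that emits fresh output lists directly.
import Mathlib
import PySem

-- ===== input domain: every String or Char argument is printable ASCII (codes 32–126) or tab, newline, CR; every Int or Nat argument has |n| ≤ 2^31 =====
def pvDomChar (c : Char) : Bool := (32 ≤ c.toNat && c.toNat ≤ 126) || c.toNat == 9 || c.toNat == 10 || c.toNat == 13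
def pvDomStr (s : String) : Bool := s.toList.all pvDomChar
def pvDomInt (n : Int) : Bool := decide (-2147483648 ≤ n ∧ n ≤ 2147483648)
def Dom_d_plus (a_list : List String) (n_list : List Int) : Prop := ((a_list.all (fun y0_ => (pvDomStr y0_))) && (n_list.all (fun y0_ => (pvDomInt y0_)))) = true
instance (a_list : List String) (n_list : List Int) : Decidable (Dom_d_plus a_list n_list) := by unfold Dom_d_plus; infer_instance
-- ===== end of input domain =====

-- B replaces A's marker pass + repeated in-place deletions by one carry pass building fresh
-- lists; A mutates its arguments in place, B does not — the claim is about the return value only.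


-- ===== PORT A =====
-- first loop: for i in range(len(a_list)): if a_list[i]=="+": n_list[i+1]=n_list[i]+n_list[i+1]; del_list.append(i)
-- (recursion over the elements with their index i; getD/set are exact because Pre_ guarantees i+1 < n_list.length at every "+")
def d_plus_phase1 : List String → Nat → List Int → List Nat → List Int × List Nat
  | [], _, nl, dl => (nl, dl)
  | x :: rest, i, nl, dl =>
    if x = "+" then
      d_plus_phase1 rest (i+1) (nl.set (i+1) (nl.getD i 0 + nl.getD (i+1) 0)) (dl ++ [i])
    else d_plus_phase1 rest (i+1) nl dl

-- second loop: for del_el in reversed(del_list): del a_list[del_el]; del n_list[del_el]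
-- ('del xs[j]' on a valid index is List.eraseIdx; every recorded index is valid under Pre_)
def d_plus (a_list : List String) (n_list : List Int) : List String × List Int :=
  let p := d_plus_phase1 a_list 0 n_list []
  p.2.reverse.foldl (fun (q : List String × List Int) d => (q.1.eraseIdx d, q.2.eraseIdx d)) (a_list, p.1)

-- ===== PORT B =====
-- the carry loop over n_list, pulling the matching marker (None once a_list is exhausted)
def d_plus_alt_go : List String → List Int → Int → List Int
  | _, [], _ => []
  | as, v :: ns, c =>
    let v' := v + c
    match as with
    | [] => v' :: d_plus_alt_go [] ns 0
    | x :: as' => if x = "+" then d_plus_alt_go as' ns v' else v' :: d_plus_alt_go as' ns 0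

def d_plus_alt (a_list : List String) (n_list : List Int) : List String × List Int :=
  (a_list.filter (fun a => !(a == "+")), d_plus_alt_go a_list n_list 0)

-- ===== PRECONDITION & SPEC =====
-- Pre_ excludes exactly the inputs on which A raises IndexError: a "+" marker whose right
-- neighbour position does not exist in n_list.
def Pre_d_plus (a_list : List String) (n_list : List Int) : Prop :=
  ∀ i < a_list.length, a_list.getD i "" = "+" → i + 1 < n_list.length
instance (a_list : List String) (n_list : List Int) : Decidable (Pre_d_plus a_list n_list) := by unfold Pre_d_plus; infer_instance

def pvWitness_d_plus : List String × List Int := (["+", "x"], [1, 2, 3])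

def Spec_d_plus (a_list : List String) (n_list : List Int) (out : List String × List Int) : Prop := out = d_plus_alt a_list n_list
instance (a_list : List String) (n_list : List Int) (out : List String × List Int) : Decidable (Spec_d_plus a_list n_list out) := by unfold Spec_d_plus; infer_instance

-- ===== CLAIM (what is proved, stated in full; the proofs are below) =====
def Claim_equal_d_plus : Prop := ∀ (a_list : List String) (n_list : List Int), Dom_d_plus a_list n_list → Pre_d_plus a_list n_list → Spec_d_plus a_list n_list (d_plus a_list n_list)

-- ===== LEMMAS AND PROOFS =====

lemma phase1_acc (rest : List String) : ∀ (i : Nat) (nl : List Int) (dl : List Nat),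
    d_plus_phase1 rest i nl dl = ((d_plus_phase1 rest i nl []).1, dl ++ (d_plus_phase1 rest i nl []).2) := by
  induction rest with
  | nil => intro i nl dl; simp [d_plus_phase1]
  | cons x rest ih =>
      intro i nl dl
      by_cases hx : x = "+" <;> simp only [d_plus_phase1, hx, ↓reduceIte]
      · rw [ih (i+1) _ (dl ++ [i]), ih (i+1) _ ([] ++ [i])]; simp
      · rw [ih (i+1) nl dl]

lemma phase1_shift (rest : List String) : ∀ (i : Nat) (v : Int) (nl : List Int),
    d_plus_phase1 rest (i+1) (v :: nl) [] =
      (v :: (d_plus_phase1 rest i nl []).1, (d_plus_phase1 rest i nl []).2.map (· + 1)) := by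
  induction rest with
  | nil => intro i v nl; simp [d_plus_phase1]
  | cons x rest ih =>
      intro i v nl
      by_cases hx : x = "+" <;> simp only [d_plus_phase1, hx, ↓reduceIte]
      · have hset : (v :: nl).set (i+1+1) ((v :: nl).getD (i+1) 0 + (v :: nl).getD (i+1+1) 0)
            = v :: nl.set (i+1) (nl.getD i 0 + nl.getD (i+1) 0) := by
          simp [List.getD, List.set]
        rw [hset, phase1_acc rest (i+1+1) _ ([] ++ [i+1]), ih (i+1) v _,
            phase1_acc rest (i+1) _ ([] ++ [i])]
        simp
      · exact ih (i+1) v nl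

lemma foldl_erase_pair {α β : Type} (ds : List Nat) :
    ∀ (a : List α) (b : List β),
    ds.foldl (fun (q : List α × List β) d => (q.1.eraseIdx d, q.2.eraseIdx d)) (a, b)
      = (ds.foldl (fun l d => l.eraseIdx d) a, ds.foldl (fun l d => l.eraseIdx d) b) := by
  induction ds with
  | nil => intro a b; simp
  | cons d ds ih => intro a b; simp [List.foldl, ih]

lemma foldl_erase_shift {α : Type} (ds : List Nat) :
    ∀ (x : α) (l : List α),
    (ds.map (· + 1)).foldl (fun l d => l.eraseIdx d) (x :: l)
      = x :: ds.foldl (fun l d => l.eraseIdx d) l := by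
  induction ds with
  | nil => intro x l; simp
  | cons d ds ih => intro x l; simp [List.foldl, List.eraseIdx, ih]

-- A-step, non-marker head
lemma d_plus_cons (x : String) (as : List String) (v : Int) (ns : List Int) (hx : ¬ x = "+") :
    d_plus (x :: as) (v :: ns) = (x :: (d_plus as ns).1, v :: (d_plus as ns).2) := by
  simp only [d_plus, d_plus_phase1, hx, ↓reduceIte]
  rw [show (0:Nat)+1 = 1 from rfl] at *
  rw [phase1_shift as 0 v ns]
  rw [← List.map_reverse, foldl_erase_pair, foldl_erase_pair, foldl_erase_shift, foldl_erase_shift]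

-- A-step, marker head
lemma d_plus_plus (as : List String) (v w : Int) (ns : List Int) :
    d_plus ("+" :: as) (v :: w :: ns) = d_plus as ((v + w) :: ns) := by
  simp only [d_plus, d_plus_phase1, ↓reduceIte]
  have hset : (v :: w :: ns).set (0+1) ((v :: w :: ns).getD 0 0 + (v :: w :: ns).getD (0+1) 0)
      = v :: (v + w) :: ns := by simp [List.getD]
  rw [hset, phase1_acc as (0+1) _ ([] ++ [0]), phase1_shift as 0 v ((v+w) :: ns)]
  simp only [List.nil_append, List.reverse_append, List.reverse_cons, List.reverse_nil,
    List.foldl_append]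
  rw [← List.map_reverse, foldl_erase_pair, foldl_erase_pair, foldl_erase_shift,
    foldl_erase_shift, foldl_erase_pair]
  simp [List.eraseIdx]

-- B-step helpers
lemma go_nil : ∀ (ns : List Int), d_plus_alt_go [] ns 0 = ns := by
  intro ns; induction ns with
  | nil => rfl
  | cons v ns ih => simp [d_plus_alt_go, ih]

lemma go_carry (as : List String) (w : Int) (ns : List Int) (c : Int) :
    d_plus_alt_go as (w :: ns) c = d_plus_alt_go as ((w + c) :: ns) 0 := by
  cases as with
  | nil => simp [d_plus_alt_go]
  | cons x as => by_cases hx : x = "+" <;> simp [d_plus_alt_go, hx]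

lemma d_plus_alt_cons (x : String) (as : List String) (v : Int) (ns : List Int) (hx : ¬ x = "+") :
    d_plus_alt (x :: as) (v :: ns) = (x :: (d_plus_alt as ns).1, v :: (d_plus_alt as ns).2) := by
  simp [d_plus_alt, d_plus_alt_go, hx]

lemma d_plus_alt_plus (as : List String) (v w : Int) (ns : List Int) :
    d_plus_alt ("+" :: as) (v :: w :: ns) = d_plus_alt as ((v + w) :: ns) := by
  have h2 : d_plus_alt_go ("+" :: as) (v :: w :: ns) 0 = d_plus_alt_go as ((v + w) :: ns) 0 := by
    rw [show (d_plus_alt_go ("+" :: as) (v :: w :: ns) 0) = d_plus_alt_go as (w :: ns) (v + 0) from rfl,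
        go_carry as w ns (v + 0)]
    ring_nf
  simp [d_plus_alt, h2]

-- Pre transfer
lemma pre_tail (x : String) (as : List String) (v : Int) (ns : List Int)
    (h : Pre_d_plus (x :: as) (v :: ns)) : Pre_d_plus as ns := by
  intro i hi hpi
  have h1 := h (i+1) (by simp; omega) (by simpa using hpi)
  simp at h1; omega

lemma pre_plus (as : List String) (v w : Int) (ns : List Int)
    (h : Pre_d_plus ("+" :: as) (v :: w :: ns)) : Pre_d_plus as ((v + w) :: ns) := by
  intro i hi hpi
  have h1 := h (i+1) (by simp; omega) (by simpa using hpi)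
  simp at h1 ⊢; omega

lemma pre_no_plus (as : List String) (h : Pre_d_plus as []) : ∀ x ∈ as, ¬ x = "+" := by
  intro x hx hxp
  obtain ⟨i, hi, hget⟩ := List.getElem_of_mem hx
  exact absurd (h i hi (by rw [List.getD_eq_getElem _ _ hi, hget]; exact hxp)) (by simp)

lemma phase1_no_plus : ∀ (as : List String) (i : Nat) (nl : List Int),
    (∀ x ∈ as, ¬ x = "+") → d_plus_phase1 as i nl [] = (nl, []) := by
  intro as
  induction as with
  | nil => intro i nl _; rfl
  | cons x as ih =>
      intro i nl h
      have hx := h x (by simp)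
      simp only [d_plus_phase1, hx, ↓reduceIte]
      exact ih (i+1) nl (fun y hy => h y (by simp [hy]))

lemma main_lemma : ∀ (k : Nat) (as : List String) (ns : List Int), ns.length = k →
    Pre_d_plus as ns → d_plus as ns = d_plus_alt as ns := by
  intro k
  induction k with
  | zero =>
      intro as ns hlen hpre
      rw [List.length_eq_zero_iff] at hlen; subst hlen
      have hnp := pre_no_plus as hpre
      simp only [d_plus, phase1_no_plus as 0 [] hnp, List.reverse_nil, List.foldl_nil,
        d_plus_alt, d_plus_alt_go]
      rw [List.filter_eq_self.mpr (fun x hx => by simpa using hnp x hx)]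
  | succ k ih =>
      intro as ns hlen hpre
      cases ns with
      | nil => simp at hlen
      | cons v ns =>
          cases as with
          | nil =>
              simp [d_plus, d_plus_phase1, d_plus_alt, d_plus_alt_go, go_nil ns]
          | cons x as =>
              by_cases hx : x = "+"
              · subst hx
                cases ns with
                | nil =>
                    have := hpre 0 (by simp) (by simp)
                    simp at this
                | cons w ns =>
                    rw [d_plus_plus, d_plus_alt_plus]
                    exact ih as ((v+w) :: ns) (by simpa using hlen) (pre_plus as v w ns hpre)
              · rw [d_plus_cons x as v ns hx, d_plus_alt_cons x as v ns hx,
                    ih as ns (by simpa using hlen) (pre_tail x as v ns hpre)]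

-- ===== VERDICT (by name: the statement is the Claim_ definition above) =====
theorem d_plus_spec : Claim_equal_d_plus := by
  intro a_list n_list _ hpre
  unfold Spec_d_plus
  exact main_lemma n_list.length a_list n_list rfl hpre
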